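-- pv_equiv track=rewrite | github.com/Mehul1604/Brick_Breaker_ASCII | util.py | create_estimation
-- ===== SOURCE A (Python) =====
-- import math
--
-- def create_estimation(old_x , old_y , new_x , new_y):
--     dx = new_x - old_x
--     dy = new_y - old_y
--
--     x_dir = 0
--     y_dir = 0
--     if dx < 0:
--         x_dir = -1
--     elif dx > 0:
--         x_dir = 1
--     else:
--         x_dir = 0
--
--     if dy < 0:
--         y_dir = -1
--     elif dy > 0:
--         y_dir = 1
--     else:
--         y_dir = 0
--
--     dx = abs(dx)
--     dy = abs(dy)
--
--     if dx >= dy: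
--         if dy:
--             x_step = math.ceil(dx/dy)
--             y_step = 1
--         else:
--             x_step = 1
--             y_step = 0
--     else:
--         if dx:
--             y_step = math.ceil(dy/dx)
--             x_step = 1
--         else:
--             y_step = 1
--             x_step = 0
--
--
--     estimation_path = []
--     while dx or dy:
--         pair = [0,0]
--         if dx:
--             if (dx - x_step) < 0:
--                 pair[0] = dx
--                 dx = 0
--             else:
--                 pair[0] = x_step
--                 dx = dx - x_step
--
--         if dy:
--             if (dy - y_step) < 0:
--                 pair[1] = dy
--                 dy = 0
--             else:
--                 pair[1] = y_step
--                 dy = dy - y_step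
--
--         pair[0] = pair[0]*x_dir
--         pair[1] = pair[1]*y_dir
--         estimation_path.append(pair)
--
--     return estimation_path
-- ===== SOURCE B (Python) =====
-- import math
--
-- def _chunks(rem, step):
--     # break rem into pieces of size step (last piece may be smaller)
--     out = []
--     while rem:
--         if rem - step < 0:
--             out.append(rem)
--             rem = 0
--         else:
--             out.append(step)
--             rem = rem - step
--     return out
--
-- def create_estimation(old_x, old_y, new_x, new_y):
--     dx = new_x - old_x
--     dy = new_y - old_y
--     x_dir = (dx > 0) - (dx < 0)
--     y_dir = (dy > 0) - (dy < 0)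
--     dx = abs(dx)
--     dy = abs(dy)
--     if dx >= dy:
--         if dy:
--             x_step, y_step = math.ceil(dx / dy), 1
--         else:
--             x_step, y_step = 1, 0
--     else:
--         if dx:
--             x_step, y_step = 1, math.ceil(dy / dx)
--         else:
--             x_step, y_step = 0, 1
--     x_chunks = _chunks(dx, x_step)
--     y_chunks = _chunks(dy, y_step)
--     n = max(len(x_chunks), len(y_chunks))
--     x_chunks += [0] * (n - len(x_chunks))
--     y_chunks += [0] * (n - len(y_chunks))
--     return [[xc * x_dir, yc * y_dir] for xc, yc in zip(x_chunks, y_chunks)]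
-- ===== Notes on version B (the rewrite author's own statement) =====
-- stated objective: alternative
-- what changed: A's single interleaved while-loop that consumes both axis remainders in lockstep is replaced by two independent per-axis chunk loops whose results are merged positionally with a zero-padded zip.
import Mathlib
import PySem

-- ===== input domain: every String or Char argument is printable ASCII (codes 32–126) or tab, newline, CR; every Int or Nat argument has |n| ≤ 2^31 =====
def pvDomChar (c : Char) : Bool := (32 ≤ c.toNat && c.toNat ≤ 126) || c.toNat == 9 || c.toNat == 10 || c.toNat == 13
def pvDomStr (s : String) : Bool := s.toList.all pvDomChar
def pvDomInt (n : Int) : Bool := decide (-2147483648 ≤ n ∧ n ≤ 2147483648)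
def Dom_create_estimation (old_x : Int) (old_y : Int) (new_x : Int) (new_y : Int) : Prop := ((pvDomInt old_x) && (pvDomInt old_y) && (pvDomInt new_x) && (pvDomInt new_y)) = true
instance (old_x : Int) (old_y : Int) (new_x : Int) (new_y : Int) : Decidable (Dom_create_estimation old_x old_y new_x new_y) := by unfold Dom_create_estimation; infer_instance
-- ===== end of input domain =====

-- B replaces A's single interleaved while-loop by two independent per-axis chunk loops
-- merged positionally (zip with zero padding): a different decomposition of the same path.

-- ===== PORT A =====
-- math.ceil(a/b): exact ceiling division; float division followed by ceil coincides with
-- exact ceiling division for 1 ≤ b and 0 ≤ a ≤ 2^32 (the values reachable on Dom).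
def pvCeil (a b : Nat) : Nat := (a + b - 1) / b

-- A's while-loop; dx,dy are the (nonnegative) absolute deltas, kept as Nat, so the Python
-- test `dx - x_step < 0` becomes `dx < xs`. The fuel argument only makes the loop total;
-- the call site passes dx + dy, which suffices since every iteration reachable from the
-- call site shrinks dx + dy by at least 1.
def pvLoopA (f : Nat) (dx dy xs ys : Nat) (xd yd : Int) : List (List Int) :=
  match f with
  | 0 => []
  | f + 1 =>
    if dx ≠ 0 ∨ dy ≠ 0 then
      let px : Nat := if dx ≠ 0 then (if dx < xs then dx else xs) else 0
      let dx' : Nat := if dx ≠ 0 then (if dx < xs then 0 else dx - xs) else dx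
      let py : Nat := if dy ≠ 0 then (if dy < ys then dy else ys) else 0
      let dy' : Nat := if dy ≠ 0 then (if dy < ys then 0 else dy - ys) else dy
      [(px : Int) * xd, (py : Int) * yd] :: pvLoopA f dx' dy' xs ys xd yd
    else []

def create_estimation (old_x : Int) (old_y : Int) (new_x : Int) (new_y : Int) : List (List Int) :=
  let dxi := new_x - old_x
  let dyi := new_y - old_y
  let x_dir : Int := if dxi < 0 then -1 else if dxi > 0 then 1 else 0
  let y_dir : Int := if dyi < 0 then -1 else if dyi > 0 then 1 else 0
  let dx := dxi.natAbs
  let dy := dyi.natAbs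
  let steps : Nat × Nat :=
    if dx ≥ dy then
      (if dy ≠ 0 then (pvCeil dx dy, 1) else (1, 0))
    else
      (if dx ≠ 0 then (1, pvCeil dy dx) else (0, 1))
  pvLoopA (dx + dy) dx dy steps.1 steps.2 x_dir y_dir

-- ===== PORT B =====
-- Source B's _chunks subtraction loop; fuel (= rem at the call site) only makes it total,
-- since step ≥ 1 whenever rem ≠ 0 at the call site.
def pvChunks (f : Nat) (rem step : Nat) : List Nat :=
  match f with
  | 0 => []
  | f + 1 =>
    if rem ≠ 0 then
      if rem < step then [rem] else step :: pvChunks f (rem - step) step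
    else []

def create_estimation_alt (old_x : Int) (old_y : Int) (new_x : Int) (new_y : Int) : List (List Int) :=
  let dxi := new_x - old_x
  let dyi := new_y - old_y
  let x_dir : Int := (if dxi > 0 then 1 else 0) - (if dxi < 0 then 1 else 0)
  let y_dir : Int := (if dyi > 0 then 1 else 0) - (if dyi < 0 then 1 else 0)
  let dx := dxi.natAbs
  let dy := dyi.natAbs
  let steps : Nat × Nat :=
    if dx ≥ dy then
      (if dy ≠ 0 then (pvCeil dx dy, 1) else (1, 0))
    else
      (if dx ≠ 0 then (1, pvCeil dy dx) else (0, 1))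
  let xcs := pvChunks dx dx steps.1
  let ycs := pvChunks dy dy steps.2
  let n := max xcs.length ycs.length
  let xps := xcs ++ List.replicate (n - xcs.length) 0
  let yps := ycs ++ List.replicate (n - ycs.length) 0
  List.zipWith (fun (a b : Nat) => [(a : Int) * x_dir, (b : Int) * y_dir]) xps yps

-- ===== PRECONDITION & SPEC =====
def Spec_create_estimation (old_x : Int) (old_y : Int) (new_x : Int) (new_y : Int) (out : List (List Int)) : Prop := out = create_estimation_alt old_x old_y new_x new_y
instance (old_x : Int) (old_y : Int) (new_x : Int) (new_y : Int) (out : List (List Int)) : Decidable (Spec_create_estimation old_x old_y new_x new_y out) := by unfold Spec_create_estimation; infer_instance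

-- ===== CLAIM (what is proved, stated in full; the proofs are below) =====
def Claim_equal_create_estimation : Prop := ∀ (old_x : Int) (old_y : Int) (new_x : Int) (new_y : Int), Dom_create_estimation old_x old_y new_x new_y → Spec_create_estimation old_x old_y new_x new_y (create_estimation old_x old_y new_x new_y)

-- ===== LEMMAS AND PROOFS =====

lemma pvChunks_zero (f s : Nat) : pvChunks f 0 s = [] := by
  cases f <;> simp [pvChunks]

-- fuel irrelevance: any fuel ≥ rem gives the same chunk list (when step ≥ 1 or rem = 0)
lemma pvChunks_fuel (f : Nat) : ∀ g rem s, rem ≤ g → g ≤ f → (rem = 0 ∨ 1 ≤ s) →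
    pvChunks g rem s = pvChunks rem rem s := by
  induction f with
  | zero =>
    intro g rem s h1 h2 _
    interval_cases g <;> simp_all
  | succ f ih =>
    intro g rem s h1 h2 hs
    cases g with
    | zero => interval_cases rem; rfl
    | succ g =>
      rcases Nat.eq_zero_or_pos rem with h | h
      · subst h; simp [pvChunks_zero]
      · rcases hs with hs | hs; · omega
        obtain ⟨r, rfl⟩ : ∃ r, rem = r + 1 := ⟨rem - 1, by omega⟩
        by_cases hlt : r + 1 < s
        · simp [pvChunks, hlt]
        · simp only [pvChunks, if_pos (by omega : r + 1 ≠ 0), if_neg hlt]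
          rw [ih g (r + 1 - s) s (by omega) (by omega) (by omega),
              ih r (r + 1 - s) s (by omega) (by omega) (by omega)]

-- the zero-padded positional zip of the two chunk lists, as B computes it
def pvMerge (xd yd : Int) (xcs ycs : List Nat) : List (List Int) :=
  List.zipWith (fun (a b : Nat) => [(a : Int) * xd, (b : Int) * yd])
    (xcs ++ List.replicate (max xcs.length ycs.length - xcs.length) 0)
    (ycs ++ List.replicate (max xcs.length ycs.length - ycs.length) 0)

lemma pvMerge_nil_nil (xd yd : Int) : pvMerge xd yd [] [] = [] := by simp [pvMerge]

lemma pvMerge_cons_cons (xd yd : Int) (x y : Nat) (xs ys : List Nat) :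
    pvMerge xd yd (x :: xs) (y :: ys) =
      [(x : Int) * xd, (y : Int) * yd] :: pvMerge xd yd xs ys := by
  simp only [pvMerge, List.length_cons]
  have h1 : max (xs.length + 1) (ys.length + 1) - (xs.length + 1)
      = max xs.length ys.length - xs.length := by omega
  have h2 : max (xs.length + 1) (ys.length + 1) - (ys.length + 1)
      = max xs.length ys.length - ys.length := by omega
  rw [h1, h2]; rfl

lemma pvMerge_nil_cons (xd yd : Int) (y : Nat) (ys : List Nat) :
    pvMerge xd yd [] (y :: ys) = [0, (y : Int) * yd] :: pvMerge xd yd [] ys := by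
  simp only [pvMerge, List.nil_append, List.length_nil, List.length_cons]
  have h1 : max 0 (ys.length + 1) = ys.length + 1 := by omega
  have h2 : max 0 ys.length = ys.length := by omega
  rw [h1, h2]
  simp [List.replicate_succ]

lemma pvMerge_cons_nil (xd yd : Int) (x : Nat) (xs : List Nat) :
    pvMerge xd yd (x :: xs) [] = [(x : Int) * xd, 0] :: pvMerge xd yd xs [] := by
  simp only [pvMerge, List.nil_append, List.length_nil, List.length_cons]
  have h1 : max (xs.length + 1) 0 = xs.length + 1 := by omega
  have h2 : max xs.length 0 = xs.length := by omega
  rw [h1, h2]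
  simp [List.replicate_succ]

-- main invariant: A's interleaved loop equals the merge of the two per-axis chunk lists
lemma pvLoopA_eq_merge (f : Nat) : ∀ dx dy xs ys (xd yd : Int),
    dx ≤ f → dy ≤ f → (dx = 0 ∨ 1 ≤ xs) → (dy = 0 ∨ 1 ≤ ys) →
    pvLoopA f dx dy xs ys xd yd = pvMerge xd yd (pvChunks f dx xs) (pvChunks f dy ys) := by
  induction f with
  | zero =>
    intro dx dy xs ys xd yd h1 h2 _ _
    simp [pvLoopA, pvChunks, pvMerge_nil_nil]
  | succ f ih =>
    intro dx dy xs ys xd yd h1 h2 hxs hys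
    by_cases hdx : dx = 0
    · subst hdx
      by_cases hdy : dy = 0
      · subst hdy; simp [pvLoopA, pvChunks, pvMerge_nil_nil]
      · rcases hys with h | hys1; · omega
        simp only [pvLoopA, pvChunks, if_pos (Or.inr hdy), if_neg (by simp : ¬ ((0:Nat) ≠ 0)),
          if_pos hdy]
        by_cases hlt : dy < ys
        · simp only [if_pos hlt]
          rw [pvMerge_nil_cons]
          rw [ih 0 0 xs ys xd yd (by omega) (by omega) (Or.inl rfl) (Or.inl rfl)]
          simp [pvChunks_zero, Nat.cast_zero, zero_mul]
        · simp only [if_neg hlt]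
          rw [pvMerge_nil_cons]
          rw [ih 0 (dy - ys) xs ys xd yd (by omega) (by omega) (Or.inl rfl) (by omega)]
          simp [pvChunks_zero]
    · rcases hxs with h | hxs1; · omega
      by_cases hdy : dy = 0
      · subst hdy
        simp only [pvLoopA, pvChunks, if_pos (Or.inl hdx), if_pos hdx,
          if_neg (by simp : ¬ ((0:Nat) ≠ 0))]
        by_cases hlt : dx < xs
        · simp only [if_pos hlt]
          rw [pvMerge_cons_nil]
          rw [ih 0 0 xs ys xd yd (by omega) (by omega) (Or.inl rfl) (Or.inl rfl)]
          simp [pvChunks_zero]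
        · simp only [if_neg hlt]
          rw [pvMerge_cons_nil]
          rw [ih (dx - xs) 0 xs ys xd yd (by omega) (by omega) (by omega) (Or.inl rfl)]
          simp [pvChunks_zero]
      · rcases hys with h | hys1; · omega
        simp only [pvLoopA, pvChunks, if_pos (Or.inl hdx), if_pos hdx, if_pos hdy]
        by_cases hltx : dx < xs <;> by_cases hlty : dy < ys <;>
          simp only [if_pos, if_neg, hltx, hlty, if_true, if_false] <;>
        · rw [pvMerge_cons_cons]
          first
          | rw [ih 0 0 xs ys xd yd (by omega) (by omega) (Or.inl rfl) (Or.inl rfl)]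
          | rw [ih 0 (dy - ys) xs ys xd yd (by omega) (by omega) (Or.inl rfl) (by omega)]
          | rw [ih (dx - xs) 0 xs ys xd yd (by omega) (by omega) (by omega) (Or.inl rfl)]
          | rw [ih (dx - xs) (dy - ys) xs ys xd yd (by omega) (by omega) (by omega) (by omega)]
          try simp [pvChunks_zero]

lemma pvCeil_pos (a b : Nat) (ha : 1 ≤ a) (hb : 1 ≤ b) : 1 ≤ pvCeil a b := by
  unfold pvCeil
  rw [Nat.le_div_iff_mul_le hb]
  omega

lemma sign_eq (d : Int) :
    (if d < 0 then (-1 : Int) else if d > 0 then 1 else 0)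
      = (if d > 0 then 1 else 0) - (if d < 0 then 1 else 0) := by
  rcases lt_trichotomy d 0 with h | h | h <;> simp_all <;> omega

-- ===== VERDICT (by name: the statement is the Claim_ definition above) =====
theorem create_estimation_spec : Claim_equal_create_estimation := by
  intro old_x old_y new_x new_y _
  unfold Spec_create_estimation create_estimation create_estimation_alt
  simp only []
  rw [← sign_eq (new_x - old_x), ← sign_eq (new_y - old_y)]
  set dx := (new_x - old_x).natAbs with hdx
  set dy := (new_y - old_y).natAbs with hdy
  set steps : Nat × Nat :=
    (if dx ≥ dy then
      (if dy ≠ 0 then (pvCeil dx dy, 1) else (1, 0))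
    else
      (if dx ≠ 0 then (1, pvCeil dy dx) else (0, 1))) with hsteps
  have hxs : dx = 0 ∨ 1 ≤ steps.1 := by
    rw [hsteps]
    split_ifs with h1 h2 h3
    · exact Or.inr (pvCeil_pos _ _ (by omega) (by omega))
    · exact Or.inr le_rfl
    · exact Or.inr le_rfl
    · exact Or.inl (by omega)
  have hys : dy = 0 ∨ 1 ≤ steps.2 := by
    rw [hsteps]
    split_ifs with h1 h2 h3
    · exact Or.inr le_rfl
    · exact Or.inl (by simpa using h2)
    · exact Or.inr (pvCeil_pos _ _ (by omega) (by omega))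
    · exact Or.inr le_rfl
  rw [pvLoopA_eq_merge (dx + dy) dx dy steps.1 steps.2 _ _ (by omega) (by omega) hxs hys]
  rw [pvChunks_fuel (dx + dy) (dx + dy) dx steps.1 (by omega) le_rfl hxs,
      pvChunks_fuel (dx + dy) (dx + dy) dy steps.2 (by omega) le_rfl hys]
  rfl
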